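-- pv_equiv track=rewrite | github.com/mmmmosca/theta-lang | src/fastpaths.py | cy_balance_brackets
-- ===== SOURCE A (Python) =====
-- def cy_balance_brackets(s: str) -> int:
--     depth_round = 0
--     depth_sq = 0
--     depth_curly = 0
--     in_sq = False
--     in_dq = False
--     i = 0
--     L = len(s)
--     while i < L:
--         ch = s[i]
--         if ch == "'" and not in_dq:
--             in_sq = not in_sq
--         elif ch == '"' and not in_sq:
--             in_dq = not in_dq
--         elif not in_sq and not in_dq:
--             if ch == '(':
--                 depth_round += 1
--             elif ch == ')':
--                 depth_round -= 1
--             elif ch == '[':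
--                 depth_sq += 1
--             elif ch == ']':
--                 depth_sq -= 1
--             elif ch == '{':
--                 depth_curly += 1
--             elif ch == '}':
--                 depth_curly -= 1
--         i += 1
--     return depth_round + depth_sq + depth_curly
-- ===== SOURCE B (Python) =====
-- def cy_balance_brackets(s: str) -> int:
--     # Pass 1: strip string-literal contents (same quote-toggle logic as A),
--     # collecting code-context characters into a buffer.
--     in_sq = False
--     in_dq = False
--     buf = []
--     for ch in s:
--         if ch == "'" and not in_dq:
--             in_sq = not in_sq
--         elif ch == '"' and not in_sq:
--             in_dq = not in_dq
--         elif not in_sq and not in_dq: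
--             buf.append(ch)
--     # Pass 2: count brackets in the stripped buffer.
--     return (buf.count('(') - buf.count(')')) \
--          + (buf.count('[') - buf.count(']')) \
--          + (buf.count('{') - buf.count('}'))
-- ===== Notes on version B (the rewrite author's own statement) =====
-- stated objective: alternative
-- what changed: A fuses quote-state tracking and three inline bracket counters in one scan; B decomposes into a stripping pass that collects code-context characters into a buffer and a separate counting pass over the buffer (six count calls).
import Mathlib
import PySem

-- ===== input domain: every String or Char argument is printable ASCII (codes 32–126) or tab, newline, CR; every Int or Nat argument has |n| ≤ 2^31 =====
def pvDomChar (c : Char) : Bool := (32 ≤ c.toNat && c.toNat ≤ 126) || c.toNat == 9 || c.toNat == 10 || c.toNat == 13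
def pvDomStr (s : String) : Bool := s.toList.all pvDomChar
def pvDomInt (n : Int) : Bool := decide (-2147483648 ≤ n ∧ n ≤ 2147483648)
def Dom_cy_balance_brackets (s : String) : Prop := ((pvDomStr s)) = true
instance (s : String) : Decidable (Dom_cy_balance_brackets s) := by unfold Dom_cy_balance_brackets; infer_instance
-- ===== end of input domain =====

-- B replaces A's fused scan (quote toggling + three inline counters) by a strip-then-count
-- decomposition: collect code-context characters into a buffer, then count brackets there.

-- ===== PORT A =====
-- state: (depth_round, depth_sq, depth_curly, in_sq, in_dq)
def pvAStep (st : Int × Int × Int × Bool × Bool) (ch : Char) : Int × Int × Int × Bool × Bool :=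
  match st with
  | (dr, ds, dc, sq, dq) =>
    if ch = '\'' ∧ ¬ dq = true then (dr, ds, dc, !sq, dq)
    else if ch = '"' ∧ ¬ sq = true then (dr, ds, dc, sq, !dq)
    else if ¬ sq = true ∧ ¬ dq = true then
      if ch = '(' then (dr + 1, ds, dc, sq, dq)
      else if ch = ')' then (dr - 1, ds, dc, sq, dq)
      else if ch = '[' then (dr, ds + 1, dc, sq, dq)
      else if ch = ']' then (dr, ds - 1, dc, sq, dq)
      else if ch = '{' then (dr, ds, dc + 1, sq, dq)
      else if ch = '}' then (dr, ds, dc - 1, sq, dq)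
      else (dr, ds, dc, sq, dq)
    else (dr, ds, dc, sq, dq)

def cy_balance_brackets (s : String) : Int :=
  let r := s.toList.foldl pvAStep (0, 0, 0, false, false)
  r.1 + r.2.1 + r.2.2.1

-- ===== PORT B =====
-- state: (in_sq, in_dq, buf)
def pvBStep (st : Bool × Bool × List Char) (ch : Char) : Bool × Bool × List Char :=
  match st with
  | (sq, dq, buf) =>
    if ch = '\'' ∧ ¬ dq = true then (!sq, dq, buf)
    else if ch = '"' ∧ ¬ sq = true then (sq, !dq, buf)
    else if ¬ sq = true ∧ ¬ dq = true then (sq, dq, buf ++ [ch])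
    else (sq, dq, buf)

def pvNet (buf : List Char) : Int :=
  ((buf.count '(' : Int) - (buf.count ')' : Int))
  + ((buf.count '[' : Int) - (buf.count ']' : Int))
  + ((buf.count '{' : Int) - (buf.count '}' : Int))

def cy_balance_brackets_alt (s : String) : Int :=
  pvNet (s.toList.foldl pvBStep (false, false, [])).2.2

-- ===== PRECONDITION & SPEC =====
def Spec_cy_balance_brackets (s : String) (out : Int) : Prop := out = cy_balance_brackets_alt s
instance (s : String) (out : Int) : Decidable (Spec_cy_balance_brackets s out) := by unfold Spec_cy_balance_brackets; infer_instance

-- ===== CLAIM (what is proved, stated in full; the proofs are below) =====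
def Claim_equal_cy_balance_brackets : Prop := ∀ (s : String), Dom_cy_balance_brackets s → Spec_cy_balance_brackets s (cy_balance_brackets s)

-- ===== LEMMAS AND PROOFS =====
lemma pvNet_snoc (buf : List Char) (ch : Char) :
    pvNet (buf ++ [ch]) = pvNet buf +
      (if ch = '(' then 1 else if ch = ')' then -1
       else if ch = '[' then 1 else if ch = ']' then -1
       else if ch = '{' then 1 else if ch = '}' then -1 else 0) := by
  simp [pvNet, List.count_append, List.count_singleton]
  split_ifs <;> simp_all <;> ring

lemma pv_main (l : List Char) : ∀ (sq dq : Bool) (dr ds dc : Int) (buf : List Char),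
    (l.foldl pvAStep (dr, ds, dc, sq, dq)).1
      + (l.foldl pvAStep (dr, ds, dc, sq, dq)).2.1
      + (l.foldl pvAStep (dr, ds, dc, sq, dq)).2.2.1
    = dr + ds + dc + pvNet ((l.foldl pvBStep (sq, dq, buf)).2.2) - pvNet buf := by
  induction l with
  | nil => intro sq dq dr ds dc buf; simp [List.foldl]
  | cons ch t ih =>
    intro sq dq dr ds dc buf
    simp only [List.foldl, pvAStep, pvBStep]
    split_ifs with h1 h2 h3 h4 h5 h6 h7 h8 h9 <;>
      first
        | exact ih _ _ _ _ _ _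
        | (rw [ih _ _ _ _ _ (buf ++ [ch]), pvNet_snoc]; simp_all; try ring)

-- ===== VERDICT (by name: the statement is the Claim_ definition above) =====
theorem cy_balance_brackets_spec : Claim_equal_cy_balance_brackets := by
  intro s _
  unfold Spec_cy_balance_brackets cy_balance_brackets cy_balance_brackets_alt
  have h := pv_main s.toList false false 0 0 0 []
  simp [pvNet] at h ⊢
  omega
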